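-- pv_equiv track=rewrite | github.com/hasura/data-generator | fsi_data_generator/fsi_generators/intelligent_generators/app_mgmt/application.py | is_critical_application
-- ===== SOURCE A (Python) =====
-- def is_critical_application(application_name: str) -> bool:
--     """
--     Determine if an application is business-critical based on similarity to known critical applications.
--
--     Args:
--         application_name: Name of the application to evaluate
--
--     Returns:
--         Boolean indicating if the application is likely business-critical
--     """
--     # List of terms that suggest a business-critical application
--     critical_terms = [
--         "core", "banking", "payment", "transaction", "processing",
--         "settlement", "clearing", "fraud", "authentication", "gateway",
--         "platform", "central", "backbone", "regulatory", "compliance",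
--         "reporting", "customer", "account", "master", "data"
--     ]
--
--     # Convert application name to lowercase for easier comparison
--     app_name_lower = application_name.lower()
--
--     # Count how many critical terms appear in the application name
--     term_matches = sum(1 for term in critical_terms if term in app_name_lower)
--
--     # Check for specific highly critical combinations
--     critical_combinations = [
--         ("core", "banking"),
--         ("payment", "gateway"),
--         ("transaction", "processing"),
--         ("settlement", "system"),
--         ("customer", "account"),
--         ("fraud", "detection"),
--         ("identity", "authentication")
--     ]
--
--     # Count how many critical combinations appear in the application name
--     combination_matches = sum(1 for combo in critical_combinations
--                               if combo[0] in app_name_lower and combo[1] in app_name_lower)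
--
--     # Calculate a criticality score based on matches
--     criticality_score = term_matches + (combination_matches * 3)
--
--     # Applications with a score above a threshold are considered critical
--     return criticality_score >= 3
-- ===== SOURCE B (Python) =====
-- def is_critical_application(application_name: str) -> bool:
--     critical_terms = [
--         "core", "banking", "payment", "transaction", "processing",
--         "settlement", "clearing", "fraud", "authentication", "gateway",
--         "platform", "central", "backbone", "regulatory", "compliance",
--         "reporting", "customer", "account", "master", "data"
--     ]
--     critical_combinations = [
--         ("core", "banking"),
--         ("payment", "gateway"),
--         ("transaction", "processing"),
--         ("settlement", "system"),
--         ("customer", "account"),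
--         ("fraud", "detection"),
--         ("identity", "authentication")
--     ]
--     # all keywords the decision can ever depend on
--     keywords = critical_terms + ["system", "detection", "identity"]
--     s = application_name.lower()
--     # one left-to-right scan over the name: at each position record every
--     # keyword that starts there (naive multi-pattern matching)
--     found = set()
--     for i in range(len(s) + 1):
--         for w in keywords:
--             if w not in found and s.startswith(w, i):
--                 found.add(w)
--     # a matched combination alone decides criticality
--     if any(a in found and b in found for a, b in critical_combinations):
--         return True
--     return sum(1 for t in critical_terms if t in found) >= 3
-- ===== Notes on version B (the rewrite author's own statement) =====
-- stated objective: alternative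
-- what changed: Instead of A's 27 independent per-term substring searches combined into a weighted score (terms + 3*combos >= 3), B makes ONE left-to-right scan over the lowered name, collecting at each position the set of keywords that start there (naive multi-pattern matching), then decides by a short-circuit over the combination pairs followed by a plain matched-term count against 3.
import Mathlib
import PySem

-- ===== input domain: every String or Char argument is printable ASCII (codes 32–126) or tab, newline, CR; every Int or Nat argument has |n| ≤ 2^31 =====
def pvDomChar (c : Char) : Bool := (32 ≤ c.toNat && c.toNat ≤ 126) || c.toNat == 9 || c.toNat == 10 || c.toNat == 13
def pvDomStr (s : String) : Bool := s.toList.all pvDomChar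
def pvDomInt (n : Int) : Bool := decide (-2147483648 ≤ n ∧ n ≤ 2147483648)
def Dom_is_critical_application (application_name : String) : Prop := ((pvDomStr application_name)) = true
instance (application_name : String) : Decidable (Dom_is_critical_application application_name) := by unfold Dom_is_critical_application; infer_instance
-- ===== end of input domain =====

-- B replaces A's per-term substring searches + weighted score by a single positional scan of the
-- name collecting the set of matched keywords, then a combo short-circuit and a plain term count.

def pvCriticalTerms : List String :=
  ["core", "banking", "payment", "transaction", "processing",
   "settlement", "clearing", "fraud", "authentication", "gateway",
   "platform", "central", "backbone", "regulatory", "compliance",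
   "reporting", "customer", "account", "master", "data"]

def pvCriticalCombinations : List (String × String) :=
  [("core", "banking"), ("payment", "gateway"), ("transaction", "processing"),
   ("settlement", "system"), ("customer", "account"), ("fraud", "detection"),
   ("identity", "authentication")]

-- ===== PORT A =====
def is_critical_application (application_name : String) : Bool :=
  let app_name_lower := PySem.Str.lower application_name
  let term_matches : Nat :=
    pvCriticalTerms.foldl (fun acc term => if PySem.Str.isIn term app_name_lower then acc + 1 else acc) 0
  let combination_matches : Nat :=
    pvCriticalCombinations.foldl
      (fun acc combo => if PySem.Str.isIn combo.1 app_name_lower && PySem.Str.isIn combo.2 app_name_lower then acc + 1 else acc) 0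
  let criticality_score : Nat := term_matches + combination_matches * 3
  decide (3 ≤ criticality_score)

-- ===== PORT B =====
def pvKeywords : List String := pvCriticalTerms ++ ["system", "detection", "identity"]

-- the positional-scan loop of Source B: for i in range(len(s)+1): for w in keywords:
--   if w not in found and s.startswith(w, i): found.add(w)   (s.startswith(w, i) = prefix at i)
def pvFound (s : List Char) : PySem.Set String :=
  (List.range (s.length + 1)).foldl
    (fun acc i =>
      pvKeywords.foldl
        (fun acc w =>
          if ¬ acc.contains w ∧ PySem.Chars.startswith (s.drop i) w.toList then
            PySem.Set.add acc w
          else acc)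
        acc)
    PySem.Set.empty

def is_critical_application_alt (application_name : String) : Bool :=
  let found := pvFound (PySem.Str.lower application_name).toList
  if pvCriticalCombinations.any (fun c => found.contains c.1 && found.contains c.2) then
    true
  else
    decide (3 ≤ pvCriticalTerms.countP (fun t => found.contains t))

-- ===== PRECONDITION & SPEC =====
def Spec_is_critical_application (application_name : String) (out : Bool) : Prop := out = is_critical_application_alt application_name
instance (application_name : String) (out : Bool) : Decidable (Spec_is_critical_application application_name out) := by unfold Spec_is_critical_application; infer_instance

-- ===== CLAIM (what is proved, stated in full; the proofs are below) =====
def Claim_equal_is_critical_application : Prop := ∀ (application_name : String), Dom_is_critical_application application_name → Spec_is_critical_application application_name (is_critical_application application_name)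

-- ===== LEMMAS AND PROOFS =====

-- membership after the inner (per-keyword) fold at one position
theorem pv_mem_inner (s : List Char) (i : Nat) (kws : List String) (acc : List String) (w : String) :
    w ∈ kws.foldl
        (fun acc w =>
          if ¬ acc.contains w ∧ PySem.Chars.startswith (s.drop i) w.toList then
            PySem.Set.add acc w
          else acc) acc
      ↔ w ∈ acc ∨ (w ∈ kws ∧ PySem.Chars.startswith (s.drop i) w.toList = true) := by
  induction kws generalizing acc with
  | nil => simp
  | cons k ks ih =>
    simp only [List.foldl_cons, List.mem_cons]
    split
    · next h =>
      rw [ih]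
      simp only [PySem.Set.mem_add]
      have hs : PySem.Chars.startswith (s.drop i) k.toList = true := h.2
      constructor
      · rintro ((h' | rfl) | ⟨h1, h2⟩)
        · exact Or.inl h'
        · exact Or.inr ⟨Or.inl rfl, hs⟩
        · exact Or.inr ⟨Or.inr h1, h2⟩
      · rintro (h' | ⟨(rfl | h1), h2⟩)
        · exact Or.inl (Or.inl h')
        · exact Or.inl (Or.inr rfl)
        · exact Or.inr ⟨h1, h2⟩
    · next h =>
      rw [ih]
      by_cases hs : PySem.Chars.startswith (s.drop i) k.toList = true
      · have hk : k ∈ acc := by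
          by_contra hk
          exact h ⟨fun hc => hk ((PySem.Set.contains_iff acc k).mp hc), hs⟩
        constructor
        · rintro (h' | ⟨h1, h2⟩)
          · exact Or.inl h'
          · exact Or.inr ⟨Or.inr h1, h2⟩
        · rintro (h' | ⟨(rfl | h1), h2⟩)
          · exact Or.inl h'
          · exact Or.inl hk
          · exact Or.inr ⟨h1, h2⟩
      · constructor
        · rintro (h' | ⟨h1, h2⟩)
          · exact Or.inl h'
          · exact Or.inr ⟨Or.inr h1, h2⟩
        · rintro (h' | ⟨(rfl | h1), h2⟩)
          · exact Or.inl h'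
          · exact absurd h2 hs
          · exact Or.inr ⟨h1, h2⟩

-- membership after the outer (positional) fold
theorem pv_mem_outer (s : List Char) (n : Nat) (acc : List String) (w : String) :
    w ∈ (List.range n).foldl
        (fun acc i =>
          pvKeywords.foldl
            (fun acc w =>
              if ¬ acc.contains w ∧ PySem.Chars.startswith (s.drop i) w.toList then
                PySem.Set.add acc w
              else acc) acc) acc
      ↔ w ∈ acc ∨ (w ∈ pvKeywords ∧ ∃ i < n, w.toList <+: s.drop i) := by
  induction n generalizing acc with
  | zero => simp
  | succ m ih =>
    rw [List.range_succ, List.foldl_append]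
    simp only [List.foldl_cons, List.foldl_nil, pv_mem_inner, ih]
    simp only [PySem.Chars.startswith_iff]
    constructor
    · rintro ((h | ⟨h1, i, hi, h2⟩) | ⟨h1, h2⟩)
      · exact Or.inl h
      · exact Or.inr ⟨h1, i, Nat.lt_succ_of_lt hi, h2⟩
      · exact Or.inr ⟨h1, m, Nat.lt_succ_self m, h2⟩
    · rintro (h | ⟨h1, i, hi, h2⟩)
      · exact Or.inl (Or.inl h)
      · rcases Nat.lt_succ_iff_lt_or_eq.mp hi with hlt | rfl
        · exact Or.inl (Or.inr ⟨h1, i, hlt, h2⟩)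
        · exact Or.inr ⟨h1, h2⟩

-- a keyword is in 'found' iff it is a substring of the lowered name
theorem pv_found_contains (s : List Char) (w : String) (hw : w ∈ pvKeywords) :
    (pvFound s).contains w = PySem.Chars.isIn w.toList s := by
  have h1 : ((pvFound s).contains w = true) ↔ (PySem.Chars.isIn w.toList s = true) := by
    rw [PySem.Set.contains_iff]
    unfold pvFound
    rw [pv_mem_outer]
    rw [← PySem.Chars.exists_prefix_drop_iff_isIn]
    constructor
    · rintro (h | ⟨_, i, _, h⟩)
      · exact absurd h (List.not_mem_nil)
      · exact ⟨i, h⟩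
    · rintro ⟨j, hj⟩
      refine Or.inr ⟨hw, ?_⟩
      by_cases hjl : j < s.length + 1
      · exact ⟨j, hjl, hj⟩
      · have hd : s.drop j = [] := List.drop_eq_nil_of_le (by omega)
        rw [hd] at hj
        have hwl : w.toList = [] := List.prefix_nil.mp hj
        exact ⟨s.length, Nat.lt_succ_self _, by rw [List.drop_length, hwl]⟩
  cases hb : PySem.Chars.isIn w.toList s with
  | true => exact h1.mpr hb
  | false =>
    cases hc : (pvFound s).contains w with
    | false => rfl
    | true => exact absurd (h1.mp hc) (by simp [hb])

theorem pv_any_congr {α : Type} (p q : α → Bool) (l : List α) (h : ∀ x ∈ l, p x = q x) :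
    l.any p = l.any q := by
  induction l with
  | nil => rfl
  | cons a t ih =>
    simp only [List.any_cons, h a (List.mem_cons_self), ih (fun x hx => h x (List.mem_cons_of_mem a hx))]

theorem pv_kw1 : ∀ c ∈ pvCriticalCombinations, c.1 ∈ pvKeywords := by decide
theorem pv_kw2 : ∀ c ∈ pvCriticalCombinations, c.2 ∈ pvKeywords := by decide

theorem pv_foldl_count {α : Type} (p : α → Bool) (l : List α) (n : Nat) :
    l.foldl (fun acc x => if p x then acc + 1 else acc) n = n + l.countP p := by
  induction l generalizing n with
  | nil => simp
  | cons a t ih =>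
    simp only [List.foldl_cons, List.countP_cons, ih]
    by_cases h : p a
    · simp [h]; omega
    · simp [h]

theorem pv_score_iff {α β : Type} (p : α → Bool) (q : β → Bool) (terms : List α) (combos : List β) :
    decide (3 ≤ terms.countP p + combos.countP q * 3)
      = (if combos.any q then true else decide (3 ≤ terms.countP p)) := by
  by_cases h : combos.any q = true
  · have hc : 0 < combos.countP q := by
      rcases List.any_eq_true.mp h with ⟨x, hx, hpx⟩
      exact List.countP_pos_iff.mpr ⟨x, hx, hpx⟩
    simp only [h, if_true]
    exact decide_eq_true (by omega)
  · have hc : combos.countP q = 0 := by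
      rcases Nat.eq_zero_or_pos (combos.countP q) with h0 | h0
      · exact h0
      · rcases List.countP_pos_iff.mp h0 with ⟨x, hx, hpx⟩
        exact absurd (List.any_eq_true.mpr ⟨x, hx, hpx⟩) h
    simp [h, hc]

-- ===== VERDICT (by name: the statement is the Claim_ definition above) =====
theorem is_critical_application_spec : Claim_equal_is_critical_application := by
  intro name _
  unfold Spec_is_critical_application is_critical_application is_critical_application_alt
  simp only [pv_foldl_count, Nat.zero_add]
  simp only [PySem.Str.isIn_eq]
  have hcombo :
      pvCriticalCombinations.any
          (fun c => (pvFound (PySem.Str.lower name).toList).contains c.1 &&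
                    (pvFound (PySem.Str.lower name).toList).contains c.2)
        = pvCriticalCombinations.any
          (fun c => PySem.Chars.isIn c.1.toList (PySem.Str.lower name).toList &&
                    PySem.Chars.isIn c.2.toList (PySem.Str.lower name).toList) :=
    pv_any_congr _ _ _ (fun c hc => by
      rw [pv_found_contains _ _ (pv_kw1 c hc), pv_found_contains _ _ (pv_kw2 c hc)])
  have hterm :
      pvCriticalTerms.countP (fun t => (pvFound (PySem.Str.lower name).toList).contains t)
        = pvCriticalTerms.countP (fun t => PySem.Chars.isIn t.toList (PySem.Str.lower name).toList) :=
    List.countP_congr (fun t ht => by rw [pv_found_contains _ t (List.mem_append_left _ ht)])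
  rw [hcombo, hterm]
  exact pv_score_iff _ _ _ _
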